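-- pv_equiv track=rewrite | github.com/J-William/General-Code-Repo | boundarySearch.py | boundary_search_bool
-- ===== SOURCE A (Python) =====
-- def boundary_search_bool(arr: list[bool]) -> int:
--     """
--         For a boolean array that can be cleanly divided into two completely
--         true/false subsets, find the boundary between the true/false subsets.
--         Return the index of the boundary.
--     """
--     boundary_index = -1
--     left, right = 0, len(arr) - 1
--
--     if arr[0]:
--         condition = lambda x, y=None: not x
--     else:
--         condition = lambda x, y=None: x
--
--     while left <= right:
--         mid = (left + right) // 2
--         if condition(arr[mid]):
--             boundary_index = mid
--             right = mid - 1
--         else: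
--             left = mid + 1
--
--     return boundary_index
-- ===== SOURCE B (Python) =====
-- def boundary_search_bool(arr: list[bool]) -> int:
--     """Two-stage version: materialize the binary-search decision tree over the
--     index range once (node = midpoint, children = the two half ranges), then
--     descend it with an accumulator: go left recording the node when the
--     predicate holds, right otherwise."""
--     pred = (lambda x: not x) if arr[0] else (lambda x: x)
--
--     def build(left, right):
--         if left > right:
--             return None
--         mid = (left + right) // 2
--         return (mid, build(left, mid - 1), build(mid + 1, right))
--
--     node = build(0, len(arr) - 1)
--     best = -1
--     while node is not None:
--         mid, lt, rt = node
--         if pred(arr[mid]):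
--             best = mid
--             node = lt
--         else:
--             node = rt
--     return best
-- ===== Notes on version B (the rewrite author's own statement) =====
-- stated objective: alternative
-- what changed: Replaces A's in-place interval-narrowing while-loop by two stages: first build the explicit binary-search decision tree over the index range, then iteratively descend that tree (left on predicate hit, recording the node; right otherwise); same probe sequence, different data structure and decomposition.
import Mathlib
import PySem

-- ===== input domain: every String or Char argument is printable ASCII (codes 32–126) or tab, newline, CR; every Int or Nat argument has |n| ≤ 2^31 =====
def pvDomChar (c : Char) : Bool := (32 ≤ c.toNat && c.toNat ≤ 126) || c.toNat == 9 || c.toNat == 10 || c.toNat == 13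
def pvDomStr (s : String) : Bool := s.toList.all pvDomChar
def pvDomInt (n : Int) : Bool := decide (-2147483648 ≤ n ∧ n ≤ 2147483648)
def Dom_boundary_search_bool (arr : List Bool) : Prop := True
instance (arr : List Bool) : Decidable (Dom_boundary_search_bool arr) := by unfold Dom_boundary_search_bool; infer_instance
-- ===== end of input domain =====

-- B replaces A's interval-narrowing while-loop by two stages — build the explicit
-- binary-search decision tree over the index range, then descend it — same probe
-- sequence, different data structure and decomposition (alternative, same result).

-- ===== PORT A =====
-- the while-loop of A, with a fuel guard for totality (arr.length + 1 iterations always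
-- suffice: the interval [left,right] shrinks by at least one element per iteration);
-- arr[mid] is always in range when called from the entry point, so .getD false is never hit
def pvLoopA (arr : List Bool) (cond : Bool → Bool) : Nat → Int → Int → Int → Int
  | 0, _, _, best => best
  | fuel+1, left, right, best =>
    if left ≤ right then
      let mid := PySem.Int.floordiv (left + right) 2
      if cond ((PySem.List.pyGet? arr mid).getD false) then
        pvLoopA arr cond fuel left (mid - 1) mid
      else
        pvLoopA arr cond fuel (mid + 1) right best
    else best

def boundary_search_bool (arr : List Bool) : Int :=
  match PySem.List.pyGet? arr 0 with
  | none => -1  -- unreachable: Python raises IndexError on [], excluded by Pre_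
  | some h =>
    let cond : Bool → Bool := if h then (fun x => !x) else (fun x => x)
    pvLoopA arr cond (arr.length + 1) 0 ((arr.length : Int) - 1) (-1)

-- ===== PORT B =====
-- B's explicit decision tree over the index range (Python's nested tuples / None)
inductive PvTree where
  | leaf : PvTree
  | node : Int → PvTree → PvTree → PvTree
deriving Repr

-- stage 1: build(left, right); fuel guard for totality (range shrinks each call,
-- so depth arr.length + 1 always suffices from the entry point)
def pvBuildB : Nat → Int → Int → PvTree
  | 0, _, _ => .leaf
  | fuel+1, left, right =>
    if left > right then .leaf
    else
      let mid := PySem.Int.floordiv (left + right) 2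
      .node mid (pvBuildB fuel left (mid - 1)) (pvBuildB fuel (mid + 1) right)

-- stage 2: the descent loop over the materialized tree, structural recursion
def pvDescendB (arr : List Bool) (pred : Bool → Bool) : PvTree → Int → Int
  | .leaf, best => best
  | .node mid lt rt, best =>
    if pred ((PySem.List.pyGet? arr mid).getD false) then
      pvDescendB arr pred lt mid
    else
      pvDescendB arr pred rt best

def boundary_search_bool_alt (arr : List Bool) : Int :=
  match PySem.List.pyGet? arr 0 with
  | none => -1  -- unreachable: Python raises IndexError on [], excluded by Pre_
  | some h =>
    let pred : Bool → Bool := if h then (fun x => !x) else (fun x => x)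
    pvDescendB arr pred (pvBuildB (arr.length + 1) 0 ((arr.length : Int) - 1)) (-1)

-- ===== PRECONDITION & SPEC =====
-- Pre_ excludes only the empty list, on which A (arr[0]) raises IndexError
def Pre_boundary_search_bool (arr : List Bool) : Prop := arr ≠ []
instance (arr : List Bool) : Decidable (Pre_boundary_search_bool arr) := by unfold Pre_boundary_search_bool; infer_instance
def pvWitness_boundary_search_bool : List Bool := [false, true]
def Spec_boundary_search_bool (arr : List Bool) (out : Int) : Prop := out = boundary_search_bool_alt arr
instance (arr : List Bool) (out : Int) : Decidable (Spec_boundary_search_bool arr out) := by unfold Spec_boundary_search_bool; infer_instance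

-- ===== CLAIM (what is proved, stated in full; the proofs are below) =====
def Claim_equal_boundary_search_bool : Prop := ∀ (arr : List Bool), Dom_boundary_search_bool arr → Pre_boundary_search_bool arr → Spec_boundary_search_bool arr (boundary_search_bool arr)

-- ===== LEMMAS AND PROOFS =====

-- correspondence: running A's loop on an interval equals descending the tree
-- B builds for that interval (with the same fuel), carrying the same accumulator
theorem pvLoopA_eq_descend_build (arr : List Bool) (c : Bool → Bool) :
    ∀ (fuel : Nat) (l r best : Int),
      pvLoopA arr c fuel l r best = pvDescendB arr c (pvBuildB fuel l r) best := by
  intro fuel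
  induction fuel with
  | zero => intro l r best; rfl
  | succ n ih =>
    intro l r best
    simp only [pvLoopA, pvBuildB]
    by_cases h : l ≤ r
    · rw [if_pos h, if_neg (not_lt.mpr h)]
      simp only [pvDescendB]
      by_cases hp : c ((PySem.List.pyGet? arr (PySem.Int.floordiv (l + r) 2)).getD false)
      · rw [if_pos hp, if_pos hp, ih]
      · rw [if_neg hp, if_neg hp, ih]
    · rw [if_neg h, if_pos (not_le.mp h)]
      rfl

-- ===== VERDICT (by name: the statement is the Claim_ definition above) =====
theorem boundary_search_bool_spec : Claim_equal_boundary_search_bool := by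
  intro arr _ hpre
  unfold Spec_boundary_search_bool boundary_search_bool boundary_search_bool_alt
  cases arr with
  | nil => exact absurd rfl hpre
  | cons h t =>
    have hg : PySem.List.pyGet? (h :: t) 0 = some h := by
      simp [PySem.List.pyGet?, PySem.List.pyIdx?]
    rw [hg]
    dsimp only
    exact pvLoopA_eq_descend_build _ _ _ _ _ _
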